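-- pv_equiv track=rewrite | github.com/stenknutsen/HomeGrownPOSTagger | PhaseFourTagging.py | ing_what_UNK_to_Tagger
-- ===== SOURCE A (Python) =====
-- def ing_what_UNK_to_Tagger(sent):
--     sentToReturn = []
--     skip = 0
--
--     for i in range(len(sent)):
--
--         if skip>0:
--             skip = skip -1
--             continue
--
--
--         if (i)<0 | (i+3)>=len(sent):
--             sentToReturn += [sent[i]]
--             continue
--
--         leftContext = sent[i]
--         leftTarget = sent[i+1]
--         rightTarget = sent[i+2]
--         rightContext = sent[i+3]
--
--
--         if ((leftContext[1]=="UNK")&(leftContext[0].lower().endswith("ing")))&(leftTarget[0].lower()=="what")&\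
--                 (rightTarget[1]=="UNK")&(rightContext[0].lower()=="to"):
--
--             sentToReturn += [(leftContext[0], "VBG")]
--
--
--             sentToReturn += [leftTarget]
--
--             newTup = (rightTarget[0], "V")
--             sentToReturn += [newTup]
--
--             sentToReturn += [rightContext]
--             skip = 3
--
--         else:
--             sentToReturn += [leftContext]
--
--     return sentToReturn
-- ===== SOURCE B (Python) =====
-- def ing_what_UNK_to_Tagger(sent):
--     n = len(sent)
--
--     def is_match(i):
--         lc, lt, rt, rc = sent[i], sent[i + 1], sent[i + 2], sent[i + 3]
--         return (lc[1] == "UNK" and lc[0].lower().endswith("ing")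
--                 and lt[0].lower() == "what"
--                 and rt[1] == "UNK" and rc[0].lower() == "to")
--
--     # pass 1: greedy non-overlapping match starts
--     starts = set()
--     i = 0
--     while i + 3 < n:
--         if is_match(i):
--             starts.add(i)
--             i += 4
--         else:
--             i += 1
--
--     # pass 2: build output keyed on membership in starts
--     out = []
--     j = 0
--     while j < n:
--         if j in starts:
--             out.append((sent[j][0], "VBG"))
--             out.append(sent[j + 1])
--             out.append((sent[j + 2][0], "V"))
--             out.append(sent[j + 3])
--             j += 4
--         else:
--             out.append(sent[j])
--             j += 1
--     return out
-- ===== Notes on version B (the rewrite author's own statement) =====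
-- stated objective: alternative
-- what changed: Replaces the single skip-counter scan with two passes: a first scan records the greedy non-overlapping match-start indices in a set, and a second pass builds the output keyed on membership in that set.
import Mathlib
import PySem

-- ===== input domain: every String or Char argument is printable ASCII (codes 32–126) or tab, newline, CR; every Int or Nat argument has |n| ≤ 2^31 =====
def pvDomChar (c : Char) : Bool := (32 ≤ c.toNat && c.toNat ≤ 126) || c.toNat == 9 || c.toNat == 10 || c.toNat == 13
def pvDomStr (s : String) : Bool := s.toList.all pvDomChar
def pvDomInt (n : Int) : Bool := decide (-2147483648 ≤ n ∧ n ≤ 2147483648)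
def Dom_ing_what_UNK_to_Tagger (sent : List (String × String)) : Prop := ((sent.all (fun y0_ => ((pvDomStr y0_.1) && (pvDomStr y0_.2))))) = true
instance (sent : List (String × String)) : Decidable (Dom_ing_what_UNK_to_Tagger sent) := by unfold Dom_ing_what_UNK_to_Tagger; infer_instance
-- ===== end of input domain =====

-- ===== PORT A =====
-- B restates A's loop as two passes (match-start set, then rebuild); proved equal. Return value only; A mutates nothing.
-- sent.getD is used for sent[i]: every access in A occurs at an index proved in range by the loop guards, so it is exact.
def ing_what_UNK_to_Tagger (sent : List (String × String)) : List (String × String) :=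
  ((List.range sent.length).foldl
    (fun (st : List (String × String) × Nat) i =>
      let acc := st.1
      let skip := st.2
      if skip > 0 then (acc, skip - 1)
      else if i < Nat.lor 0 (i + 3) ∧ Nat.lor 0 (i + 3) ≥ sent.length then
        (acc ++ [sent.getD i ("", "")], skip)
      else
        let leftContext := sent.getD i ("", "")
        let leftTarget := sent.getD (i + 1) ("", "")
        let rightTarget := sent.getD (i + 2) ("", "")
        let rightContext := sent.getD (i + 3) ("", "")
        if ((leftContext.2 == "UNK") &&
              PySem.Str.endswith (PySem.Str.lower leftContext.1) "ing") &&
            (PySem.Str.lower leftTarget.1 == "what") &&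
            (rightTarget.2 == "UNK") && (PySem.Str.lower rightContext.1 == "to") then
          (acc ++ [(leftContext.1, "VBG")] ++ [leftTarget] ++ [(rightTarget.1, "V")]
               ++ [rightContext], 3)
        else (acc ++ [leftContext], skip))
    ([], 0)).1

-- ===== PORT B =====
def pvIsMatch (sent : List (String × String)) (i : Nat) : Bool :=
  let lc := sent.getD i ("", "")
  let lt := sent.getD (i + 1) ("", "")
  let rt := sent.getD (i + 2) ("", "")
  let rc := sent.getD (i + 3) ("", "")
  (lc.2 == "UNK") && PySem.Str.endswith (PySem.Str.lower lc.1) "ing" &&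
    (PySem.Str.lower lt.1 == "what") && (rt.2 == "UNK") &&
    (PySem.Str.lower rc.1 == "to")

-- pass 1: greedy non-overlapping match-start indices (B's `while i + 3 < n`)
def pvStarts (sent : List (String × String)) (i : Nat) : List Nat :=
  if _h : i + 3 < sent.length then
    if pvIsMatch sent i then i :: pvStarts sent (i + 4) else pvStarts sent (i + 1)
  else []
termination_by sent.length - i

-- pass 2: rebuild keyed on membership in the start set (B's `while j < n`)
def pvBuild (sent : List (String × String)) (starts : List Nat) (j : Nat) :
    List (String × String) :=
  if _h : j < sent.length then
    if starts.contains j then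
      ((sent.getD j ("", "")).1, "VBG") :: sent.getD (j + 1) ("", "") ::
        ((sent.getD (j + 2) ("", "")).1, "V") :: sent.getD (j + 3) ("", "") ::
        pvBuild sent starts (j + 4)
    else sent.getD j ("", "") :: pvBuild sent starts (j + 1)
  else []
termination_by sent.length - j

def ing_what_UNK_to_Tagger_alt (sent : List (String × String)) : List (String × String) :=
  pvBuild sent (pvStarts sent 0) 0

-- ===== PRECONDITION & SPEC =====
def Spec_ing_what_UNK_to_Tagger (sent : List (String × String)) (out : List (String × String)) : Prop := out = ing_what_UNK_to_Tagger_alt sent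
instance (sent : List (String × String)) (out : List (String × String)) : Decidable (Spec_ing_what_UNK_to_Tagger sent out) := by unfold Spec_ing_what_UNK_to_Tagger; infer_instance

-- ===== CLAIM (what is proved, stated in full; the proofs are below) =====
def Claim_equal_ing_what_UNK_to_Tagger : Prop := ∀ (sent : List (String × String)), Dom_ing_what_UNK_to_Tagger sent → Spec_ing_what_UNK_to_Tagger sent (ing_what_UNK_to_Tagger sent)

-- ===== LEMMAS AND PROOFS =====

-- A's loop step, named for the proofs (definitionally the lambda inside ing_what_UNK_to_Tagger)
def pvStepA (sent : List (String × String)) (st : List (String × String) × Nat) (i : Nat) :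
    List (String × String) × Nat :=
  let acc := st.1
  let skip := st.2
  if skip > 0 then (acc, skip - 1)
  else if i < Nat.lor 0 (i + 3) ∧ Nat.lor 0 (i + 3) ≥ sent.length then
    (acc ++ [sent.getD i ("", "")], skip)
  else
    let leftContext := sent.getD i ("", "")
    let leftTarget := sent.getD (i + 1) ("", "")
    let rightTarget := sent.getD (i + 2) ("", "")
    let rightContext := sent.getD (i + 3) ("", "")
    if pvIsMatch sent i then
      (acc ++ [(leftContext.1, "VBG")] ++ [leftTarget] ++ [(rightTarget.1, "V")]
           ++ [rightContext], 3)
    else (acc ++ [leftContext], skip)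

-- accumulator-free characterisation of A's scan from index i with skip pending
def pvGoA (sent : List (String × String)) (i skip : Nat) : List (String × String) :=
  if _h : i < sent.length then
    if skip > 0 then pvGoA sent (i + 1) (skip - 1)
    else if i + 3 ≥ sent.length then sent.getD i ("", "") :: pvGoA sent (i + 1) 0
    else if pvIsMatch sent i then
      ((sent.getD i ("", "")).1, "VBG") :: sent.getD (i + 1) ("", "") ::
        ((sent.getD (i + 2) ("", "")).1, "V") :: sent.getD (i + 3) ("", "") ::
        pvGoA sent (i + 1) 3
    else sent.getD i ("", "") :: pvGoA sent (i + 1) 0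
  else []
termination_by sent.length - i

theorem pvGoA_stop (sent : List (String × String)) (i skip : Nat) (h : ¬ i < sent.length) :
    pvGoA sent i skip = [] := by rw [pvGoA]; simp [h]

theorem pvGoA_skip (sent : List (String × String)) (i s : Nat) (h : i < sent.length) :
    pvGoA sent i (s + 1) = pvGoA sent (i + 1) s := by
  rw [pvGoA]; simp [h]

theorem pvFoldA (sent : List (String × String)) :
    ∀ (k i : Nat) (acc : List (String × String)) (skip : Nat), i + k = sent.length →
      ((List.range' i k).foldl (pvStepA sent) (acc, skip)).1 = acc ++ pvGoA sent i skip := by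
  intro k
  induction k with
  | zero =>
      intro i acc skip h
      rw [pvGoA_stop sent i skip (by omega)]
      simp
  | succ k ih =>
      intro i acc skip h
      have hi : i < sent.length := by omega
      have hlor : Nat.lor 0 (i + 3) = i + 3 := Nat.zero_or _
      rw [List.range'_succ, List.foldl_cons]
      by_cases hs : skip > 0
      · have hstep : pvStepA sent (acc, skip) i = (acc, skip - 1) := by
          simp only [pvStepA]; rw [if_pos hs]
        rw [hstep, ih (i + 1) acc (skip - 1) (by omega)]
        obtain ⟨s, rfl⟩ : ∃ s, skip = s + 1 := ⟨skip - 1, by omega⟩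
        rw [pvGoA_skip sent i s hi]
        norm_num
      · have hs0 : skip = 0 := by omega
        subst hs0
        by_cases hg : i + 3 ≥ sent.length
        · have hstep : pvStepA sent (acc, 0) i = (acc ++ [sent.getD i ("", "")], 0) := by
            simp only [pvStepA]
            rw [if_neg (by omega : ¬ (0 : Nat) > 0), if_pos ⟨by omega, by omega⟩]
          rw [hstep, ih (i + 1) _ 0 (by omega)]
          conv_rhs => rw [pvGoA]
          rw [dif_pos hi, if_neg (by omega : ¬ (0 : Nat) > 0), if_pos hg, List.append_assoc]
          rfl
        · have hguard : ¬ (i < Nat.lor 0 (i + 3) ∧ Nat.lor 0 (i + 3) ≥ sent.length) := by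
            rw [hlor]; omega
          by_cases hm : pvIsMatch sent i
          · have hstep : pvStepA sent (acc, 0) i =
                (acc ++ [((sent.getD i ("", "")).1, "VBG")] ++ [sent.getD (i + 1) ("", "")]
                     ++ [((sent.getD (i + 2) ("", "")).1, "V")] ++ [sent.getD (i + 3) ("", "")],
                 3) := by
              simp only [pvStepA]
              rw [if_neg (by omega : ¬ (0 : Nat) > 0), if_neg hguard, if_pos hm]
            rw [hstep, ih (i + 1) _ 3 (by omega)]
            conv_rhs => rw [pvGoA]
            rw [dif_pos hi, if_neg (by omega : ¬ (0 : Nat) > 0), if_neg hg, if_pos hm]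
            simp
          · have hstep : pvStepA sent (acc, 0) i = (acc ++ [sent.getD i ("", "")], 0) := by
              simp only [pvStepA]
              rw [if_neg (by omega : ¬ (0 : Nat) > 0), if_neg hguard, if_neg hm]
            rw [hstep, ih (i + 1) _ 0 (by omega)]
            conv_rhs => rw [pvGoA]
            rw [dif_pos hi, if_neg (by omega : ¬ (0 : Nat) > 0), if_neg hg, if_neg hm,
              List.append_assoc]
            rfl

theorem pvStarts_ge (sent : List (String × String)) :
    ∀ i j, j ∈ pvStarts sent i → i ≤ j := by
  intro i
  induction i using pvStarts.induct sent with
  | case1 i h hm ih =>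
      intro j hj
      rw [pvStarts, dif_pos h, if_pos hm] at hj
      rcases List.mem_cons.mp hj with rfl | hj
      · exact le_refl _
      · exact le_trans (by omega) (ih j hj)
  | case2 i h hm ih =>
      intro j hj
      rw [pvStarts, dif_pos h, if_neg hm] at hj
      exact le_trans (by omega) (ih j hj)
  | case3 i h =>
      intro j hj
      rw [pvStarts, dif_neg h] at hj
      simp at hj

theorem pvStarts_stop (sent : List (String × String)) (i : Nat) (h : ¬ i + 3 < sent.length) :
    pvStarts sent i = [] := by rw [pvStarts]; simp [h]

theorem pvBuild_goA (sent : List (String × String)) :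
    ∀ (fuel i : Nat) (S : List Nat), sent.length ≤ i + fuel →
      (∀ j, i ≤ j → S.contains j = (pvStarts sent i).contains j) →
      pvBuild sent S i = pvGoA sent i 0 := by
  intro fuel
  induction fuel with
  | zero =>
      intro i S hf _
      rw [pvBuild, pvGoA_stop sent i 0 (by omega)]
      simp [show ¬ i < sent.length by omega]
  | succ fuel ih =>
      intro i S hf hS
      by_cases hi : i < sent.length
      · by_cases hg : i + 3 < sent.length
        · by_cases hm : pvIsMatch sent i
          · have hstarts : pvStarts sent i = i :: pvStarts sent (i + 4) := by
              rw [pvStarts, dif_pos hg, if_pos hm]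
            have hcontains : S.contains i = true := by
              rw [hS i (le_refl i), hstarts, List.contains_cons]
              simp
            rw [pvBuild, dif_pos hi, if_pos hcontains]
            conv_rhs => rw [pvGoA]
            rw [dif_pos hi, if_neg (by omega : ¬ (0 : Nat) > 0),
              if_neg (by omega : ¬ i + 3 ≥ sent.length), if_pos hm]
            rw [pvGoA_skip sent (i + 1) 2 (by omega), pvGoA_skip sent (i + 2) 1 (by omega),
              pvGoA_skip sent (i + 3) 0 (by omega)]
            have := ih (i + 4) S (by omega) (by
              intro j hj
              rw [hS j (by omega), hstarts, List.contains_cons,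
                show (j == i) = false by simp only [beq_eq_false_iff_ne]; omega,
                Bool.false_or])
            rw [this]
          · have hstarts : pvStarts sent i = pvStarts sent (i + 1) := by
              rw [pvStarts, dif_pos hg, if_neg hm]
            have hcontains : S.contains i = false := by
              rw [hS i (le_refl i), hstarts]
              by_contra hc
              have hmem : i ∈ pvStarts sent (i + 1) := by
                rw [← List.contains_iff_mem]
                exact Bool.not_eq_false _ |>.mp hc
              have := pvStarts_ge sent (i + 1) i hmem
              omega
            rw [pvBuild, dif_pos hi, if_neg (by rw [hcontains]; simp)]
            conv_rhs => rw [pvGoA]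
            rw [dif_pos hi, if_neg (by omega : ¬ (0 : Nat) > 0),
              if_neg (by omega : ¬ i + 3 ≥ sent.length), if_neg hm]
            rw [ih (i + 1) S (by omega) (by intro j hj; rw [hS j (by omega), hstarts])]
        · have hcontains : S.contains i = false := by
            rw [hS i (le_refl i), pvStarts_stop sent i hg]
            rfl
          rw [pvBuild, dif_pos hi, if_neg (by rw [hcontains]; simp)]
          conv_rhs => rw [pvGoA]
          rw [dif_pos hi, if_neg (by omega : ¬ (0 : Nat) > 0),
            if_pos (by omega : i + 3 ≥ sent.length)]
          rw [ih (i + 1) S (by omega) (by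
            intro j hj
            rw [hS j (by omega), pvStarts_stop sent i hg, pvStarts_stop sent (i + 1) (by omega)])]
      · rw [pvBuild, dif_neg hi, pvGoA_stop sent i 0 hi]

-- ===== VERDICT (by name: the statement is the Claim_ definition above) =====
theorem ing_what_UNK_to_Tagger_spec : Claim_equal_ing_what_UNK_to_Tagger := by
  intro sent _
  show ing_what_UNK_to_Tagger sent = ing_what_UNK_to_Tagger_alt sent
  have hA : ing_what_UNK_to_Tagger sent =
      ((List.range sent.length).foldl (pvStepA sent) ([], 0)).1 := rfl
  rw [hA, List.range_eq_range', pvFoldA sent sent.length 0 [] 0 (by omega)]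
  rw [ing_what_UNK_to_Tagger_alt,
    pvBuild_goA sent sent.length 0 (pvStarts sent 0) (by omega) (fun j _ => rfl)]
  simp
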